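-- pv_equiv track=rewrite | github.com/dhavalpandey/AdventofCode2024 | Day 23/Day23_part_2.py | cleanse
-- ===== SOURCE A (Python) =====
-- def cleanse(d):
--     fin = {}
--     for key in d:
--         initial = d[key]
--         t = set(initial)
--         for key2 in d:
--             if key2 != key:
--                 temp_vals = d[key2]
--                 if key in temp_vals:
--                     t.add(key2)
--         fin[key] = t
--     return fin
-- ===== SOURCE B (Python) =====
-- def cleanse(d):
--     rev = {}
--     for key2, vals in d.items():
--         for v in set(vals):
--             rev.setdefault(v, []).append(key2)
--     fin = {}
--     for key, vals in d.items():
--         t = set(vals)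
--         for k2 in rev.get(key, []):
--             t.add(k2)
--         fin[key] = t
--     return fin
-- ===== Notes on version B (the rewrite author's own statement) =====
-- stated objective: faster
-- what changed: replaces the per-key inner scan over all other keys by a reverse index value->keys built in one pass, then one union per key; Pre_ only excludes association lists with duplicate keys, which do not represent any Python dict
import Mathlib
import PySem

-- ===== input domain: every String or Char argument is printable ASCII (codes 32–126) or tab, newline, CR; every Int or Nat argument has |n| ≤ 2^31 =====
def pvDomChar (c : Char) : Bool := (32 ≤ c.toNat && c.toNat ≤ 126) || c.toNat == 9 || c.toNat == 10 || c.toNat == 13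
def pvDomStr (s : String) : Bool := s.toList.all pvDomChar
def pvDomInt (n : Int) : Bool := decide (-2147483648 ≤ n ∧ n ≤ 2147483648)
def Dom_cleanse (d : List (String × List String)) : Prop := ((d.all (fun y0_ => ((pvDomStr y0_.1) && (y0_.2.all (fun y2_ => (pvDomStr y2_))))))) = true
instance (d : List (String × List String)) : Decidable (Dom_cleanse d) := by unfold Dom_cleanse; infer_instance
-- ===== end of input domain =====

-- ===== PORT A =====
-- header: B builds a reverse index value→keys once and does one union per key instead of
-- an inner scan over all keys per key (measured objective: faster, asymptotic).
def cleanse (d : List (String × List String)) : List (String × List String) :=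
  (d.foldl (fun fin kv =>
      let key := kv.1
      let initial := (PySem.Dict.mk d).getD key []
      let t := PySem.Set.ofList initial
      let t := d.foldl (fun t kv2 =>
          if kv2.1 ≠ key then
            let temp_vals := (PySem.Dict.mk d).getD kv2.1 []
            if temp_vals.contains key then PySem.Set.add t kv2.1 else t
          else t) t
      fin.insert key t)
    PySem.Dict.empty).items

-- ===== PORT B =====
def cleanse_alt (d : List (String × List String)) : List (String × List String) :=
  let rev : PySem.Dict String (List String) :=
    d.foldl (fun rev kv =>
        (PySem.Set.ofList kv.2).foldl (fun rev v => rev.modify v [] (· ++ [kv.1])) rev)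
      PySem.Dict.empty
  (d.foldl (fun fin kv =>
      let t := (rev.getD kv.1 []).foldl PySem.Set.add (PySem.Set.ofList kv.2)
      fin.insert kv.1 t)
    PySem.Dict.empty).items

-- ===== PRECONDITION & SPEC =====
-- Pre_ excludes association lists with duplicate keys: they represent no Python dict,
-- so A (which receives a real dict) is never run on them and nothing is claimed there.
def Pre_cleanse (d : List (String × List String)) : Prop := (d.map Prod.fst).Nodup
instance (d : List (String × List String)) : Decidable (Pre_cleanse d) := by unfold Pre_cleanse; infer_instance
def pvWitness_cleanse : (List (String × List String)) := [("a", ["b", "a"]), ("b", [])]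

def Spec_cleanse (d : List (String × List String)) (out : List (String × List String)) : Prop := out = cleanse_alt d
instance (d : List (String × List String)) (out : List (String × List String)) : Decidable (Spec_cleanse d out) := by unfold Spec_cleanse; infer_instance

-- ===== CLAIM (what is proved, stated in full; the proofs are below) =====
def Claim_equal_cleanse : Prop := ∀ (d : List (String × List String)), Dom_cleanse d → Pre_cleanse d → Spec_cleanse d (cleanse d)

-- ===== LEMMAS AND PROOFS =====

-- conditional-add loop = fold of Set.add over the filtered key list
theorem foldl_if_add (l : List (String × List String)) (p : String × List String → Bool)
    (s : PySem.Set String) :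
    l.foldl (fun t kv => if p kv then PySem.Set.add t kv.1 else t) s
      = (List.map Prod.fst (l.filter p)).foldl PySem.Set.add s := by
  induction l generalizing s with
  | nil => rfl
  | cons x xs ih => by_cases h : p x <;> simp [h, ih]

-- adding an element already present may be skipped anywhere in an add-fold
theorem foldl_add_skip (key : String) (l : List String) :
    ∀ s : PySem.Set String, key ∈ s →
      l.foldl PySem.Set.add s = (l.filter (fun x => x != key)).foldl PySem.Set.add s := by
  induction l with
  | nil => intro s _; rfl
  | cons x xs ih =>
    intro s hs
    by_cases h : x = key
    · subst h
      simpa [List.filter_cons, PySem.Set.add_of_mem hs] using ih s hs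
    · simp only [List.filter_cons, bne_iff_ne, h, ne_eq, not_false_eq_true,
        if_true, List.foldl_cons]
      exact ih _ ((PySem.Set.mem_add s x key).mpr (Or.inl hs))

theorem filter_beq_of_nodup (s : List String) (hs : s.Nodup) (a : String) :
    s.filter (fun x => x == a) = if a ∈ s then [a] else [] := by
  induction s with
  | nil => simp
  | cons x xs ih =>
    rcases List.nodup_cons.mp hs with ⟨hx, hxs⟩
    by_cases h : x = a
    · subst h
      have : x ∉ xs := hx
      simp [ih hxs, this]
    · simp [h, ih hxs, Ne.symm h]

-- the reverse-index lookup lists exactly the keys whose value list contains `key`, in order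
theorem rev_getD (d : List (String × List String)) (key : String) :
    (d.foldl (fun rev kv =>
        (PySem.Set.ofList kv.2).foldl (fun rev v => rev.modify v [] (· ++ [kv.1])) rev)
      (PySem.Dict.empty : PySem.Dict String (List String))).getD key []
    = List.map Prod.fst (d.filter (fun kv => kv.2.contains key)) := by
  have h1 : (d.foldl (fun rev kv =>
        (PySem.Set.ofList kv.2).foldl (fun rev v => rev.modify v [] (· ++ [kv.1])) rev)
      (PySem.Dict.empty : PySem.Dict String (List String)))
      = (d.flatMap (fun kv => (PySem.Set.ofList kv.2).map (fun v => (v, kv.1)))).foldl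
          (fun r p => r.modify p.1 [] (· ++ [p.2])) PySem.Dict.empty := by
    rw [List.foldl_flatMap]
    simp [List.foldl_map]
  rw [h1, PySem.Dict.getD_foldl_modify_append]
  have h2 : ∀ dd : List (String × List String),
      List.map (fun p => p.2) (((dd.flatMap (fun kv => (PySem.Set.ofList kv.2).map (fun v => (v, kv.1))))).filter (fun p => p.1 == key))
      = List.map Prod.fst (dd.filter (fun kv => kv.2.contains key)) := by
    intro dd
    induction dd with
    | nil => rfl
    | cons kv rest ih =>
      rw [List.flatMap_cons, List.filter_append, List.map_append, ih, List.filter_cons]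
      have hcomp : ((PySem.Set.ofList kv.2).map (fun v => (v, kv.1))).filter (fun p => p.1 == key)
          = ((PySem.Set.ofList kv.2).filter (fun v => v == key)).map (fun v => (v, kv.1)) := by
        rw [List.filter_map]; rfl
      rw [hcomp, filter_beq_of_nodup _ (PySem.Set.nodup_ofList _) key]
      by_cases h : key ∈ kv.2
      · have hmem : key ∈ PySem.Set.ofList kv.2 := (PySem.Set.mem_ofList _ _).mpr h
        simp [hmem, h]
      · have hmem : key ∉ PySem.Set.ofList kv.2 := fun hc => h ((PySem.Set.mem_ofList _ _).mp hc)
        simp [hmem, h]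
  simpa using h2 d

-- per-key agreement of the two computed sets
theorem val_eq (d : List (String × List String)) (hnd : (d.map Prod.fst).Nodup)
    (kv : String × List String) (hm : kv ∈ d) :
    (d.foldl (fun t kv2 =>
        if kv2.1 ≠ kv.1 then
          if ((PySem.Dict.mk d).getD kv2.1 []).contains kv.1 then PySem.Set.add t kv2.1 else t
        else t)
      (PySem.Set.ofList ((PySem.Dict.mk d).getD kv.1 [])))
    = (List.map Prod.fst (d.filter (fun kv2 => kv2.2.contains kv.1))).foldl PySem.Set.add
        (PySem.Set.ofList kv.2) := by
  have hkeys : (PySem.Dict.mk d).keys.Nodup := by simpa [PySem.Dict.keys_mk] using hnd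
  have hlook : ∀ kv2 ∈ d, (PySem.Dict.mk d).getD kv2.1 [] = kv2.2 := by
    intro kv2 hm2
    exact PySem.Dict.getD_of_mem_items (PySem.Dict.mk d) (by exact hm2) hkeys []
  rw [hlook kv hm]
  rw [PySem.List.foldl_congr_mem d _
      (fun t kv2 => if (!(kv2.1 == kv.1) && kv2.2.contains kv.1) then PySem.Set.add t kv2.1 else t)
      _ ?_]
  · rw [foldl_if_add]
    by_cases hc : kv.1 ∈ kv.2
    · have hs : kv.1 ∈ PySem.Set.ofList kv.2 := (PySem.Set.mem_ofList _ _).mpr hc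
      conv_rhs => rw [foldl_add_skip kv.1 _ _ hs]
      rw [List.filter_map, List.filter_filter]
      refine congrArg (fun l => List.foldl PySem.Set.add (PySem.Set.ofList kv.2) l) ?_
      refine congrArg (List.map Prod.fst) ?_
      apply List.filter_congr
      intro x _
      simp [bne]
    · refine congrArg (fun l => List.foldl PySem.Set.add (PySem.Set.ofList kv.2) l) ?_
      refine congrArg (List.map Prod.fst) ?_
      apply List.filter_congr
      intro kv2 hm2
      by_cases h : kv2.1 = kv.1
      · have : kv2 = kv := List.inj_on_of_nodup_map hnd hm2 hm h
        subst this
        simp [hc]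
      · simp [h]
  · intro acc kv2 hm2
    rw [hlook kv2 hm2]
    by_cases h : kv2.1 = kv.1 <;> by_cases h2 : kv2.2.contains kv.1 = true <;>
      simp [h]


-- ===== VERDICT (by name: the statement is the Claim_ definition above) =====
theorem cleanse_spec : Claim_equal_cleanse := by
  unfold Claim_equal_cleanse
  intro d _ hpre
  unfold Spec_cleanse cleanse cleanse_alt
  rw [PySem.Dict.items_foldl_insert_fresh d (fun kv => kv.1) _ PySem.Dict.empty
      (fun a _ => by simp) (by simpa [Pre_cleanse] using hpre)]
  rw [PySem.Dict.items_foldl_insert_fresh d (fun kv => kv.1) _ PySem.Dict.empty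
      (fun a _ => by simp) (by simpa [Pre_cleanse] using hpre)]
  apply List.map_congr_left
  intro kv hm
  have hpre' : (d.map Prod.fst).Nodup := hpre
  have hv := val_eq d hpre' kv hm
  rw [rev_getD]
  exact congrArg (fun s => (kv.1, s)) hv
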